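-- pv_equiv track=rewrite | github.com/ydf0509/nb_path | tests/test_nb_path/backup/ai_md_generator.py | _generate_markdown_header
-- ===== SOURCE A (Python) =====
-- def _generate_markdown_header(as_title: str, file_text_list: list) -> list:
--     """生成包含文件树和文件列表的 Markdown 头部"""
--     str_list = [f"# markdown content namespace: {as_title} \n\n"]
--
--     # 1. 生成文件树
--     str_list.append("## File Tree\n\n")
--     str_list.append("```\n")
--     tree = {}
--     sorted_paths = sorted([item[1] for item in file_text_list])
--     for path in sorted_paths:
--         parts = path.split('/')
--         current_level = tree
--         for part in parts:
--             if part not in current_level: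
--                 current_level[part] = {}
--             current_level = current_level[part]
--
--     def format_tree(node, prefix=""):
--         lines = []
--         entries = sorted(node.keys())
--         for i, entry in enumerate(entries):
--             connector = "├── " if i < len(entries) - 1 else "└── "
--             lines.append(f"{prefix}{connector}{entry}")
--             if node[entry]:
--                 extension = "│   " if i < len(entries) - 1 else "    "
--                 lines.extend(format_tree(node[entry], prefix + extension))
--         return lines
--
--     str_list.extend(format_tree(tree))
--     str_list.append("\n```\n\n---\n\n")
--
--     # 2. 生成文件列表
--     str_list.append("## Included Files\n\n")
--     for _, relative_file_name_posix, _, _ in file_text_list: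
--         str_list.append(f"- `{relative_file_name_posix}`\n")
--     str_list.append("\n---\n\n")
--
--     return str_list
-- ===== SOURCE B (Python) =====
-- def _generate_markdown_header(as_title: str, file_text_list: list) -> list:
--     """Trie-free variant: render the file tree by recursively grouping the
--     sorted split paths by their first component instead of building a dict trie."""
--     parts_lists = [p.split('/') for p in sorted(item[1] for item in file_text_list)]
--
--     def render(groups, prefix):
--         lines = []
--         keys = sorted({g[0] for g in groups})
--         for i, key in enumerate(keys):
--             last = i == len(keys) - 1
--             lines.append(prefix + ("└── " if last else "├── ") + key)
--             tails = [g[1:] for g in groups if g[0] == key and len(g) > 1]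
--             if tails:
--                 lines.extend(render(tails, prefix + ("    " if last else "│   ")))
--         return lines
--
--     return (
--         [f"# markdown content namespace: {as_title} \n\n",
--          "## File Tree\n\n",
--          "```\n"]
--         + render(parts_lists, "")
--         + ["\n```\n\n---\n\n", "## Included Files\n\n"]
--         + [f"- `{item[1]}`\n" for item in file_text_list]
--         + ["\n---\n\n"]
--     )
-- ===== Notes on version B (the rewrite author's own statement) =====
-- stated objective: alternative
-- what changed: B renders the file tree by recursively grouping the sorted split paths by their first component (sort the distinct heads per level, recurse on the tails), eliminating A's nested-dict trie construction and its separate recursive formatter.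
import Mathlib
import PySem

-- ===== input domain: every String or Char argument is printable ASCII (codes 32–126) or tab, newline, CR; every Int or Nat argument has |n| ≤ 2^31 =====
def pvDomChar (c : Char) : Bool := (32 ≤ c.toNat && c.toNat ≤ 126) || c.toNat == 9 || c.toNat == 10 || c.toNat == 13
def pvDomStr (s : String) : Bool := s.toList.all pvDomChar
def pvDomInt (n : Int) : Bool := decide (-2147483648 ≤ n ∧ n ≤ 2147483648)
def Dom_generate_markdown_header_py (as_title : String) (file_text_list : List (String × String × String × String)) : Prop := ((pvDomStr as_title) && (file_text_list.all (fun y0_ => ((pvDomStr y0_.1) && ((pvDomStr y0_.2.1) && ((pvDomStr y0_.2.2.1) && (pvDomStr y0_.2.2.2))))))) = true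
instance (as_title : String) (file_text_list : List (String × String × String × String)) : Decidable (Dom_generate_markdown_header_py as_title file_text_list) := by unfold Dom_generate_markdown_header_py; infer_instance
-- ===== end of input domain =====

-- B replaces A's nested-dict trie + recursive formatter by a single recursive
-- grouping of the sorted split paths by head component (objective: alternative).

-- shared primitive: path.split('/') — '/' is a nonempty separator, so Str.split? is always `some`
def pySplitSlash (s : String) : List String :=
  (PySem.Str.split? s "/").getD []   -- the `none`/getD branch is unreachable (sep ≠ "")

-- ===== PORT A =====
-- the nested dict trie: a Trie IS one dict level, as an association list
-- (cons key childDict restOfThisDict), avoiding a nested inductive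
inductive Trie where
  | nil : Trie
  | cons (k : String) (child : Trie) (rest : Trie) : Trie
deriving DecidableEq, Repr

-- the inner `for part in parts` loop of A: walk/extend the trie along one path
def Trie.insertPath : Trie → List String → Trie
  | t, [] => t
  | Trie.nil, p :: rest => Trie.cons p (Trie.insertPath Trie.nil rest) Trie.nil
  | Trie.cons k c r, p :: rest =>
      if k = p then Trie.cons k (Trie.insertPath c rest) r
      else Trie.cons k c (Trie.insertPath r (p :: rest))
termination_by t parts => (parts.length, sizeOf t)

-- node[entry] lookup
def Trie.find : Trie → String → Option Trie
  | Trie.nil, _ => none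
  | Trie.cons k c r, e => if k = e then some c else Trie.find r e

-- node.keys() (dict insertion order)
def Trie.keys : Trie → List String
  | Trie.nil => []
  | Trie.cons k _ r => k :: Trie.keys r

-- termination helper for formatTree: a found child is structurally smaller
theorem Trie.find_sizeOf : ∀ (t : Trie) (e : String) (c : Trie), Trie.find t e = some c → sizeOf c < sizeOf t := by
  intro t
  induction t with
  | nil => intro e c h; simp [Trie.find] at h
  | cons k ch r ihc ihr =>
    intro e c h
    simp only [Trie.find] at h
    by_cases hk : k = e
    · simp [hk] at h; subst h; simp; omega
    · simp [hk] at h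
      have := ihr e c h
      simp; omega

mutual
-- A's format_tree(node, prefix)
def formatTree (t : Trie) (pre : String) : List String :=
  formatEntries t pre (PySem.List.sorted (Trie.keys t) (fun x => x) false) 0
    (PySem.List.sorted (Trie.keys t) (fun x => x) false).length
termination_by (sizeOf t, (PySem.List.sorted (Trie.keys t) (fun x => x) false).length + 1)
decreasing_by exact Prod.Lex.right _ (by omega)

-- A's `for i, entry in enumerate(entries)` loop (i counts up, n = len(entries));
-- the connector/line/extension locals are inlined
def formatEntries (t : Trie) (pre : String) (entries : List String) (i n : Nat) : List String :=
  match entries with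
  | [] => []
  | e :: rest =>
    (pre ++ (if i < n - 1 then "├── " else "└── ") ++ e)
      :: ((match h : Trie.find t e with
          | some c =>
            if c = Trie.nil then []
            else formatTree c (pre ++ (if i < n - 1 then "│   " else "    "))
          | none => [])   -- unreachable: entries are t's keys (Python would raise KeyError)
        ++ formatEntries t pre rest (i + 1) n)
termination_by (sizeOf t, entries.length)
decreasing_by
  · exact Prod.Lex.left _ _ (Trie.find_sizeOf t e c h)
  · exact Prod.Lex.right _ (by simp)
end

def generate_markdown_header_py (as_title : String) (file_text_list : List (String × String × String × String)) : List String :=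
  let str_list := ["# markdown content namespace: " ++ as_title ++ " \n\n"]
  let str_list := str_list ++ ["## File Tree\n\n"]
  let str_list := str_list ++ ["```\n"]
  let sorted_paths := PySem.List.sorted (file_text_list.map (fun item => item.2.1)) (fun x => x) false
  let tree := sorted_paths.foldl (fun t path => Trie.insertPath t (pySplitSlash path)) Trie.nil
  let str_list := str_list ++ formatTree tree ""
  let str_list := str_list ++ ["\n```\n\n---\n\n"]
  let str_list := str_list ++ ["## Included Files\n\n"]
  let str_list := str_list ++ file_text_list.map (fun item => "- `" ++ item.2.1 ++ "`\n")
  str_list ++ ["\n---\n\n"]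

-- ===== PORT B =====
-- B's list comprehension [g[1:] for g in groups if g[0] == key and len(g) > 1]
-- (g[0] ported as headD "": every group is nonempty on reachable inputs)
def childGroups (groups : List (List String)) (key : String) : List (List String) :=
  groups.filterMap (fun g => if g.headD "" = key ∧ 1 < g.length then some (g.drop 1) else none)

def totalLen (gs : List (List String)) : Nat := (gs.map List.length).sum

-- termination helpers for render
theorem childGroups_cons' (g : List String) (gs : List (List String)) (key : String) :
    childGroups (g :: gs) key
      = (if g.headD "" = key ∧ 1 < g.length then [g.drop 1] else []) ++ childGroups gs key := by
  simp only [childGroups, List.filterMap_cons]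
  split <;> simp_all

theorem totalLen_cons (g : List String) (gs : List (List String)) :
    totalLen (g :: gs) = g.length + totalLen gs := by simp [totalLen]

theorem childGroups_totalLen_le (groups : List (List String)) (key : String) :
    totalLen (childGroups groups key) ≤ totalLen groups := by
  induction groups with
  | nil => simp [childGroups, totalLen]
  | cons g gs ih =>
    rw [childGroups_cons', totalLen_cons]
    by_cases hp : g.headD "" = key ∧ 1 < g.length
    · rw [if_pos hp, List.singleton_append, totalLen_cons]
      have h1 : (g.drop 1).length ≤ g.length := by simp
      omega
    · rw [if_neg hp, List.nil_append]; omega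

theorem childGroups_totalLen_lt (groups : List (List String)) (key : String)
    (h : childGroups groups key ≠ []) : totalLen (childGroups groups key) < totalLen groups := by
  induction groups with
  | nil => simp [childGroups] at h
  | cons g gs ih =>
    rw [childGroups_cons', totalLen_cons]
    by_cases hp : g.headD "" = key ∧ 1 < g.length
    · rw [if_pos hp, List.singleton_append, totalLen_cons]
      have h1 : (g.drop 1).length = g.length - 1 := by simp
      have h2 := childGroups_totalLen_le gs key
      have h3 := hp.2
      omega
    · rw [if_neg hp, List.nil_append]
      rw [childGroups_cons', if_neg hp, List.nil_append] at h
      have := ih h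
      omega

mutual
-- B's render(groups, prefix)
def render (groups : List (List String)) (pre : String) : List String :=
  renderKeys groups pre
    (PySem.List.sorted (PySem.Set.ofList (groups.map (fun g => g.headD ""))) (fun x => x) false) 0
    (PySem.List.sorted (PySem.Set.ofList (groups.map (fun g => g.headD ""))) (fun x => x) false).length
termination_by (totalLen groups, (PySem.List.sorted (PySem.Set.ofList (groups.map (fun g => g.headD ""))) (fun x => x) false).length + 1)
decreasing_by exact Prod.Lex.right _ (by omega)

-- B's `for i, key in enumerate(keys)` loop (last ⟺ i = n - 1); locals inlined
def renderKeys (groups : List (List String)) (pre : String) (keys : List String) (i n : Nat) : List String :=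
  match keys with
  | [] => []
  | key :: rest =>
    (pre ++ (if i = n - 1 then "└── " else "├── ") ++ key)
      :: ((if _h : childGroups groups key = [] then []
           else render (childGroups groups key) (pre ++ (if i = n - 1 then "    " else "│   ")))
        ++ renderKeys groups pre rest (i + 1) n)
termination_by (totalLen groups, keys.length)
decreasing_by
  · exact Prod.Lex.left _ _ (childGroups_totalLen_lt groups key _h)
  · exact Prod.Lex.right _ (by simp)
end

def generate_markdown_header_py_alt (as_title : String) (file_text_list : List (String × String × String × String)) : List String :=
  let parts_lists :=
    (PySem.List.sorted (file_text_list.map (fun item => item.2.1)) (fun x => x) false).map pySplitSlash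
  ["# markdown content namespace: " ++ as_title ++ " \n\n",
   "## File Tree\n\n",
   "```\n"]
  ++ render parts_lists ""
  ++ ["\n```\n\n---\n\n", "## Included Files\n\n"]
  ++ file_text_list.map (fun item => "- `" ++ item.2.1 ++ "`\n")
  ++ ["\n---\n\n"]

-- ===== PRECONDITION & SPEC =====
def Spec_generate_markdown_header_py (as_title : String) (file_text_list : List (String × String × String × String)) (out : List String) : Prop := out = generate_markdown_header_py_alt as_title file_text_list
instance (as_title : String) (file_text_list : List (String × String × String × String)) (out : List String) : Decidable (Spec_generate_markdown_header_py as_title file_text_list out) := by unfold Spec_generate_markdown_header_py; infer_instance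

-- ===== CLAIM (what is proved, stated in full; the proofs are below) =====
def Claim_equal_generate_markdown_header_py : Prop := ∀ (as_title : String) (file_text_list : List (String × String × String × String)), Dom_generate_markdown_header_py as_title file_text_list → Spec_generate_markdown_header_py as_title file_text_list (generate_markdown_header_py as_title file_text_list)

-- ===== LEMMAS AND PROOFS =====

theorem splitOn_go_ne_nil (sep : List Char) : ∀ (fuel : Nat) (l cur : List Char) (acc : List (List Char)), PySem.Chars.splitOn.go sep fuel l cur acc ≠ [] := by
  intro fuel
  induction fuel with
  | zero => intro l cur acc; rw [PySem.Chars.splitOn.go.eq_def]; simp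
  | succ n ih =>
    intro l cur acc
    rw [PySem.Chars.splitOn.go.eq_def]
    cases l with
    | nil => simp
    | cons c rest =>
      dsimp only
      split
      · exact ih _ _ _
      · exact ih _ _ _

theorem pySplitSlash_ne_nil (s : String) : pySplitSlash s ≠ [] := by
  unfold pySplitSlash PySem.Str.split? PySem.Chars.split?
  have h1 : ("/" : String).toList = ['/'] := rfl
  rw [h1]
  simp only [List.isEmpty_cons, Bool.false_eq_true, if_false, Option.map_some, Option.getD_some,
    ne_eq, List.map_eq_nil_iff]
  unfold PySem.Chars.splitOn
  exact splitOn_go_ne_nil _ _ _ _ _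

theorem insertPath_nil_parts (t : Trie) : Trie.insertPath t [] = t := by
  cases t <;> simp [Trie.insertPath]

theorem keys_insertPath (p : String) (rest : List String) : ∀ t : Trie,
    Trie.keys (Trie.insertPath t (p :: rest)) = PySem.Set.add (Trie.keys t) p := by
  intro t
  induction t with
  | nil => simp [Trie.insertPath, Trie.keys, PySem.Set.add, PySem.Set.contains]
  | cons k c r ihc ihr =>
    by_cases hk : k = p
    · subst hk
      simp [Trie.insertPath, Trie.keys, PySem.Set.add, PySem.Set.contains]
    · simp only [Trie.insertPath, if_neg hk, Trie.keys, ihr,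
        PySem.Set.add, PySem.Set.contains, List.contains_cons]
      have hbeq : (p == k) = false := by simp; intro h; exact hk h.symm
      rw [hbeq]
      simp only [Bool.false_or]
      split <;> simp

theorem keys_build : ∀ (pls : List (List String)) (t : Trie), (∀ g ∈ pls, g ≠ []) →
    Trie.keys (pls.foldl Trie.insertPath t) = PySem.Set.update (Trie.keys t) (pls.map (fun g => g.headD "")) := by
  intro pls
  induction pls with
  | nil => intro t _; simp [PySem.Set.update]
  | cons g gs ih =>
    intro t hne
    cases g with
    | nil => exact absurd rfl (hne [] (by simp))
    | cons h tl =>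
      simp only [List.foldl_cons, List.map_cons, PySem.Set.update, List.foldl]
      rw [ih _ (fun g hg => hne g (by simp [hg]))]
      simp [PySem.Set.update, keys_insertPath]

theorem find_insertPath (p : String) (rest : List String) (e : String) : ∀ t : Trie,
    Trie.find (Trie.insertPath t (p :: rest)) e =
      if p = e then some (Trie.insertPath ((Trie.find t p).getD Trie.nil) rest) else Trie.find t e := by
  intro t
  induction t with
  | nil =>
    simp only [Trie.insertPath, Trie.find]
    by_cases hpe : p = e <;> simp [Trie.find, hpe]
  | cons k c r ihc ihr =>
    by_cases hk : k = p
    · subst hk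
      rw [show Trie.insertPath (Trie.cons k c r) (k :: rest) = Trie.cons k (Trie.insertPath c rest) r
            from by simp [Trie.insertPath]]
      by_cases he : k = e
      · subst he
        simp [Trie.find]
      · simp [Trie.find, he]
    · rw [show Trie.insertPath (Trie.cons k c r) (p :: rest) = Trie.cons k c (Trie.insertPath r (p :: rest))
            from by simp [Trie.insertPath, hk]]
      by_cases he : k = e
      · have hpe : ¬ p = e := fun h => hk (he.trans h.symm)
        simp [Trie.find, he, hpe]
      · simp only [Trie.find, if_neg he, ihr]
        simp [Trie.find, hk, he]

theorem insertPath_ne_nil (t : Trie) (p : String) (rest : List String) :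
    Trie.insertPath t (p :: rest) ≠ Trie.nil := by
  cases t with
  | nil => simp [Trie.insertPath]
  | cons k c r => simp only [Trie.insertPath]; split <;> simp

theorem build_ne_nil : ∀ (pls : List (List String)) (t : Trie), (∀ g ∈ pls, g ≠ []) → t ≠ Trie.nil →
    pls.foldl Trie.insertPath t ≠ Trie.nil := by
  intro pls
  induction pls with
  | nil => intro t _ ht; simpa using ht
  | cons g gs ih =>
    intro t hne ht
    cases g with
    | nil => exact absurd rfl (hne [] (by simp))
    | cons h tl =>
      simp only [List.foldl_cons]
      exact ih _ (fun g hg => hne g (by simp [hg])) (insertPath_ne_nil t h tl)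

theorem build_nil_eq_nil_iff (pls : List (List String)) (hne : ∀ g ∈ pls, g ≠ []) :
    pls.foldl Trie.insertPath Trie.nil = Trie.nil ↔ pls = [] := by
  constructor
  · intro h
    cases pls with
    | nil => rfl
    | cons g gs =>
      cases g with
      | nil => exact absurd rfl (hne [] (by simp))
      | cons p tl =>
        simp only [List.foldl_cons] at h
        exact absurd h (build_ne_nil gs _ (fun g hg => hne g (by simp [hg])) (insertPath_ne_nil _ p tl))
  · intro h; subst h; rfl

theorem childGroups_of_not_mem (pls : List (List String)) (e : String)
    (h : e ∉ pls.map (fun g => g.headD "")) : childGroups pls e = [] := by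
  induction pls with
  | nil => rfl
  | cons g gs ih =>
    simp only [List.map_cons, List.mem_cons, not_or] at h
    rw [childGroups_cons', if_neg (fun hc => h.1 hc.1.symm), List.nil_append]
    exact ih h.2

theorem childGroups_mem_ne_nil (pls : List (List String)) (e : String) :
    ∀ g ∈ childGroups pls e, g ≠ [] := by
  intro g hg
  simp only [childGroups, List.mem_filterMap] at hg
  obtain ⟨g', _, hsome⟩ := hg
  split at hsome
  · rename_i hp
    cases hsome
    have h2 := hp.2
    simp only [ne_eq, List.drop_eq_nil_iff]
    omega
  · cases hsome

theorem find_build : ∀ (pls : List (List String)) (t : Trie) (e : String), (∀ g ∈ pls, g ≠ []) →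
    Trie.find (pls.foldl Trie.insertPath t) e =
      match Trie.find t e with
      | some c => some ((childGroups pls e).foldl Trie.insertPath c)
      | none =>
          if e ∈ pls.map (fun g => g.headD "")
          then some ((childGroups pls e).foldl Trie.insertPath Trie.nil)
          else none := by
  intro pls
  induction pls with
  | nil =>
    intro t e _
    simp only [List.foldl_nil, childGroups, List.filterMap_nil, List.map_nil, List.not_mem_nil,
      if_false]
    cases Trie.find t e <;> simp
  | cons g gs ih =>
    intro t e hne
    cases g with
    | nil => exact absurd rfl (hne [] (by simp))
    | cons h tl =>
      simp only [List.foldl_cons]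
      rw [ih _ e (fun g hg => hne g (by simp [hg]))]
      rw [find_insertPath h tl e t, childGroups_cons']
      simp only [List.headD_cons, List.map_cons]
      by_cases he : h = e
      · subst he
        rw [if_pos rfl]
        by_cases htl : tl = []
        · subst htl
          rw [if_neg (by simp : ¬ (h = h ∧ 1 < ([h] : List String).length)), List.nil_append,
            insertPath_nil_parts]
          cases hfind : Trie.find t h with
          | some c => simp
          | none => simp
        · have hcnd : (h = h ∧ 1 < (h :: tl).length) := by
            refine ⟨rfl, ?_⟩
            cases tl with
            | nil => exact absurd rfl htl
            | cons a b => simp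
          rw [if_pos hcnd, List.singleton_append, List.foldl_cons, List.drop_one, List.tail_cons]
          cases hfind : Trie.find t h with
          | some c => simp
          | none => simp
      · rw [if_neg he, if_neg (show ¬ (h = e ∧ 1 < (h :: tl).length) from fun hc => he hc.1),
          List.nil_append]
        have hm1 : (e ∈ h :: List.map (fun g => g.headD "") gs)
            ↔ (e ∈ List.map (fun g => g.headD "") gs) := by
          simp only [List.mem_cons]
          exact or_iff_right (fun h' => he h'.symm)
        cases hfind : Trie.find t e with
        | some c => rfl
        | none => exact if_congr hm1.symm rfl rfl

theorem tree_render (N : Nat) : ∀ (pls : List (List String)), totalLen pls ≤ N →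
    (∀ g ∈ pls, g ≠ []) → ∀ pre, formatTree (pls.foldl Trie.insertPath Trie.nil) pre = render pls pre := by
  induction N using Nat.strong_induction_on with
  | _ N ihN =>
  intro pls hN hne pre
  rw [formatTree, render]
  have hkeys : Trie.keys (pls.foldl Trie.insertPath Trie.nil)
      = PySem.Set.ofList (pls.map (fun g => g.headD "")) := by
    rw [keys_build pls Trie.nil hne]
    simp [Trie.keys, PySem.Set.update, PySem.Set.ofList_eq_foldl]
  rw [hkeys]
  have aux : ∀ (entries : List String) (i n : Nat), i + entries.length = n → ∀ pre',
      formatEntries (pls.foldl Trie.insertPath Trie.nil) pre' entries i n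
        = renderKeys pls pre' entries i n := by
    intro entries
    induction entries with
    | nil => intro i n _ pre'; rw [formatEntries, renderKeys]
    | cons e rest ihe =>
      intro i n hn pre'
      rw [formatEntries, renderKeys]
      have hfind := find_build pls Trie.nil e hne
      simp only [Trie.find] at hfind
      have hlen : i + (rest.length + 1) = n := by simpa using hn
      have hrec := ihe (i + 1) n (by omega) pre'
      by_cases hlast : i = n - 1
      · have h1 : ¬ i < n - 1 := by omega
        simp only [if_neg h1, if_pos hlast]
        refine congrArg₂ List.cons rfl (congrArg₂ (· ++ ·) ?_ hrec)
        -- the extension part: found child vs grouped tails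
        · split
          · rename_i c heq
            by_cases hmem : e ∈ pls.map (fun g => g.headD "")
            · rw [if_pos hmem] at hfind
              have hc : c = (childGroups pls e).foldl Trie.insertPath Trie.nil := by
                have := heq.symm.trans hfind
                exact Option.some.inj this
              subst hc
              by_cases hcg : childGroups pls e = []
              · rw [dif_pos hcg, hcg]
                simp
              · have hcne := childGroups_mem_ne_nil pls e
                have hnn : (childGroups pls e).foldl Trie.insertPath Trie.nil ≠ Trie.nil :=
                  fun hcn => hcg ((build_nil_eq_nil_iff _ hcne).mp hcn)
                rw [dif_neg hcg, if_neg hnn]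
                have hlt : totalLen (childGroups pls e) < N :=
                  lt_of_lt_of_le (childGroups_totalLen_lt pls e hcg) hN
                exact ihN _ hlt _ le_rfl hcne _
            · rw [if_neg hmem] at hfind
              exact absurd (heq.symm.trans hfind) (by simp)
          · rename_i heq
            by_cases hmem : e ∈ pls.map (fun g => g.headD "")
            · rw [if_pos hmem] at hfind
              exact absurd (heq.symm.trans hfind) (by simp)
            · rw [dif_pos (childGroups_of_not_mem pls e hmem)]
      · have h1 : i < n - 1 := by omega
        simp only [if_pos h1, if_neg hlast]
        refine congrArg₂ List.cons rfl (congrArg₂ (· ++ ·) ?_ hrec)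
        · split
          · rename_i c heq
            by_cases hmem : e ∈ pls.map (fun g => g.headD "")
            · rw [if_pos hmem] at hfind
              have hc : c = (childGroups pls e).foldl Trie.insertPath Trie.nil := by
                have := heq.symm.trans hfind
                exact Option.some.inj this
              subst hc
              by_cases hcg : childGroups pls e = []
              · rw [dif_pos hcg, hcg]
                simp
              · have hcne := childGroups_mem_ne_nil pls e
                have hnn : (childGroups pls e).foldl Trie.insertPath Trie.nil ≠ Trie.nil :=
                  fun hcn => hcg ((build_nil_eq_nil_iff _ hcne).mp hcn)
                rw [dif_neg hcg, if_neg hnn]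
                have hlt : totalLen (childGroups pls e) < N :=
                  lt_of_lt_of_le (childGroups_totalLen_lt pls e hcg) hN
                exact ihN _ hlt _ le_rfl hcne _
            · rw [if_neg hmem] at hfind
              exact absurd (heq.symm.trans hfind) (by simp)
          · rename_i heq
            by_cases hmem : e ∈ pls.map (fun g => g.headD "")
            · rw [if_pos hmem] at hfind
              exact absurd (heq.symm.trans hfind) (by simp)
            · rw [dif_pos (childGroups_of_not_mem pls e hmem)]
  exact aux _ 0 _ (by simp) pre

-- ===== VERDICT (by name: the statement is the Claim_ definition above) =====
theorem generate_markdown_header_py_spec : Claim_equal_generate_markdown_header_py := by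
  intro as_title ftl _
  unfold Spec_generate_markdown_header_py generate_markdown_header_py generate_markdown_header_py_alt
  have hfold : (PySem.List.sorted (ftl.map (fun item => item.2.1)) (fun x => x) false).foldl
        (fun t path => Trie.insertPath t (pySplitSlash path)) Trie.nil
      = ((PySem.List.sorted (ftl.map (fun item => item.2.1)) (fun x => x) false).map pySplitSlash).foldl
        Trie.insertPath Trie.nil := by
    rw [List.foldl_map]
  have hne : ∀ g ∈ (PySem.List.sorted (ftl.map (fun item => item.2.1)) (fun x => x) false).map pySplitSlash, g ≠ [] := by
    intro g hg
    simp only [List.mem_map] at hg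
    obtain ⟨p, _, hp⟩ := hg
    exact hp ▸ pySplitSlash_ne_nil p
  have htr := tree_render _ _ le_rfl hne ""
  simp only [hfold, htr, List.append_assoc, List.cons_append, List.nil_append]
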